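-- pv_equiv track=rewrite | github.com/trustgraph-ai/trustgraph | translate_docs.py | _find_best_split_index
-- ===== SOURCE A (Python) =====
-- from typing import Dict, Iterable, List, Optional, Sequence, Tuple
--
-- def _is_good_split_boundary(line: str) -> bool:
--     s = line.strip()
--     if s == "":
--         return True
--     if s.startswith("#"):
--         return True
--     if s in {"---", "***", "___"}:
--         return True
--     return False
--
-- def _find_best_split_index(lines: Sequence[str]) -> int:
--     """Pick a split point near the middle, preferably after a safe Markdown boundary."""
--     n = len(lines)
--     if n <= 1:
--         return 1
--
--     mid = n // 2
--     candidates: List[int] = []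
--     for i in range(1, n):
--         if _is_good_split_boundary(lines[i - 1]):
--             candidates.append(i)
--     if not candidates:
--         return mid
--
--     return min(candidates, key=lambda i: abs(i - mid))
-- ===== SOURCE B (Python) =====
-- def _is_good_split_boundary(line: str) -> bool:
--     s = line.strip()
--     if s == "":
--         return True
--     if s.startswith("#"):
--         return True
--     if s in {"---", "***", "___"}:
--         return True
--     return False
--
-- def _find_best_split_index(lines) -> int:
--     """Outward scan from the middle: return the first index (preferring the
--     lower one on ties) whose previous line is a safe Markdown boundary."""
--     n = len(lines)
--     if n <= 1:
--         return 1
--     mid = n // 2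
--     d = 0
--     while mid - d >= 1 or mid + d <= n - 1:
--         i = mid - d
--         if i >= 1 and _is_good_split_boundary(lines[i - 1]):
--             return i
--         i = mid + d
--         if i <= n - 1 and _is_good_split_boundary(lines[i - 1]):
--             return i
--         d += 1
--     return mid
-- ===== Notes on version B (the rewrite author's own statement) =====
-- stated objective: alternative
-- what changed: Instead of collecting every boundary index and taking min by |i-mid|, B scans outward from the middle (testing mid-d before mid+d for d=0,1,...) and returns the first boundary index found, falling back to mid when the window leaves [1, n-1].
import Mathlib
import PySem

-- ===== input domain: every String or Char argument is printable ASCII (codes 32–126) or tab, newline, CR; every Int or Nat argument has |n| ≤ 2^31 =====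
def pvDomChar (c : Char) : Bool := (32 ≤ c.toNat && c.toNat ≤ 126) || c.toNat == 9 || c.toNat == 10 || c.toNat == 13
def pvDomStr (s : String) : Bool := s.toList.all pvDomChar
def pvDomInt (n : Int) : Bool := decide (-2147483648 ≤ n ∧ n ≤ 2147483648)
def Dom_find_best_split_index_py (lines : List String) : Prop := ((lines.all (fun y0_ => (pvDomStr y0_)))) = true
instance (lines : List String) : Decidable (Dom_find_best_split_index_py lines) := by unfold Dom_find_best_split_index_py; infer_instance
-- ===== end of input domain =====

-- B replaces "collect all boundary indices, then argmin of |i-mid|" by an outward scan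
-- from the middle that returns the first boundary index found (lower index tried first
-- on each distance, matching min's tie-break); objective: alternative decomposition.

-- ===== PORT A =====
-- shared helper: literal port of _is_good_split_boundary (identical in Source A and Source B)
def pvGoodBoundary (line : String) : Bool :=
  let s := PySem.Str.strip line
  if s == "" then true
  else if PySem.Str.startswith s "#" then true
  else if s == "---" || s == "***" || s == "___" then true
  else false

def find_best_split_index_py (lines : List String) : Int :=
  let n : Int := lines.length
  if n ≤ 1 then 1
  else
    let mid := PySem.Int.floordiv n 2
    let candidates : List Int :=
      (PySem.List.pyRange 1 n 1).foldl
        (fun acc i => if pvGoodBoundary (PySem.List.pyGetD lines (i - 1) "") then acc ++ [i] else acc) []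
    if candidates = [] then mid
    else
      match PySem.List.min? candidates (fun i => |i - mid|) with
      | some m => m
      | none => mid

-- ===== PORT B =====
-- the while loop of Source B: d = 0, 1, 2, …; try mid-d then mid+d.
-- fuel only makes the recursion structural; with fuel > the loop's guard bound it is never hit
def pvOutward (p : Int → Bool) (n mid : Int) : Nat → Nat → Int
  | _, 0 => mid
  | d, fuel + 1 =>
    if 1 ≤ mid - (d : Int) ∨ mid + (d : Int) ≤ n - 1 then
      if 1 ≤ mid - (d : Int) ∧ p (mid - (d : Int)) then mid - (d : Int)
      else if mid + (d : Int) ≤ n - 1 ∧ p (mid + (d : Int)) then mid + (d : Int)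
      else pvOutward p n mid (d + 1) fuel
    else mid

def find_best_split_index_py_alt (lines : List String) : Int :=
  let n : Int := lines.length
  if n ≤ 1 then 1
  else pvOutward (fun i => pvGoodBoundary (PySem.List.pyGetD lines (i - 1) "")) n
    (PySem.Int.floordiv n 2) 0 (lines.length + 1)

-- ===== PRECONDITION & SPEC =====
def Spec_find_best_split_index_py (lines : List String) (out : Int) : Prop := out = find_best_split_index_py_alt lines
instance (lines : List String) (out : Int) : Decidable (Spec_find_best_split_index_py lines out) := by unfold Spec_find_best_split_index_py; infer_instance

-- ===== CLAIM (what is proved, stated in full; the proofs are below) =====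
def Claim_equal_find_best_split_index_py : Prop := ∀ (lines : List String), Dom_find_best_split_index_py lines → Spec_find_best_split_index_py lines (find_best_split_index_py lines)

-- ===== LEMMAS AND PROOFS =====

-- the fold function underlying PySem.List.min?
def pvMinF {α : Type} (key : α → Int) : Option α → α → Option α :=
  fun acc x =>
    match acc with
    | none => some x
    | some m => if key x < key m then some x else some m

theorem pvMinF_keep {α : Type} (key : α → Int) (l : List α) (m : α)
    (h : ∀ y ∈ l, ¬ key y < key m) : l.foldl (pvMinF key) (some m) = some m := by
  induction l with
  | nil => rfl
  | cons a t ih =>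
    have ha : ¬ key a < key m := h a (by simp)
    simp only [List.foldl_cons, pvMinF, if_neg ha]
    exact ih (fun y hy => h y (by simp [hy]))

theorem pvMinF_above {α : Type} (key : α → Int) (x : α) (l : List α) :
    ∀ m : α, key x < key m → (∀ y ∈ l, key x < key y) →
    ∃ m', l.foldl (pvMinF key) (some m) = some m' ∧ key x < key m' := by
  induction l with
  | nil => exact fun m hm _ => ⟨m, rfl, hm⟩
  | cons a t ih =>
    intro m hm h
    have ha : key x < key a := h a (by simp)
    simp only [List.foldl_cons, pvMinF]
    by_cases hc : key a < key m
    · simp only [if_pos hc]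
      exact ih a ha (fun y hy => h y (by simp [hy]))
    · simp only [if_neg hc]
      exact ih m hm (fun y hy => h y (by simp [hy]))

theorem pvMin?_eq_foldl {α : Type} (key : α → Int) (xs : List α) :
    PySem.List.min? xs key = xs.foldl (pvMinF key) none := rfl

-- Python min with a key returns the FIRST element with minimal key
theorem pvMin?_first {α : Type} (key : α → Int) (l1 : List α) (x : α) (l2 : List α)
    (h1 : ∀ y ∈ l1, key x < key y) (h2 : ∀ y ∈ l2, key x ≤ key y) :
    PySem.List.min? (l1 ++ x :: l2) key = some x := by
  have hl2 : l2.foldl (pvMinF key) (some x) = some x :=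
    pvMinF_keep key l2 x (fun y hy => not_lt.mpr (h2 y hy))
  rw [pvMin?_eq_foldl]
  cases l1 with
  | nil => simpa [pvMinF] using hl2
  | cons a t =>
    have ha : key x < key a := h1 a (by simp)
    obtain ⟨m', hm', hxm'⟩ :=
      pvMinF_above key x t a ha (fun y hy => h1 y (by simp [hy]))
    simp only [List.cons_append, List.foldl_cons, List.foldl_append, pvMinF, hm']
    simp only [if_pos hxm']
    exact hl2

-- the filtered candidate list of A, decomposed around a member x
theorem pvFilter_split (p : Int → Bool) (n x : Int) (hx1 : 1 ≤ x) (hxn : x ≤ n - 1)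
    (hpx : p x = true) :
    (PySem.List.pyRange 1 n 1).filter p =
      (PySem.List.pyRange 1 x 1).filter p ++ x :: (PySem.List.pyRange (x + 1) n 1).filter p := by
  rw [PySem.List.pyRange_one_append 1 x n hx1 (by omega),
      PySem.List.pyRange_one_cons (a := x) (b := n) (by omega)]
  simp [List.filter_append, hpx]

-- A's guarded min over the candidate list, as B's loop computes it
theorem pvOutward_eq (p : Int → Bool) (n mid : Int) (fuel : Nat) :
    ∀ d : Nat, 1 ≤ mid → mid ≤ n - 1 → n.toNat + 1 ≤ d + fuel →
    (∀ i : Int, 1 ≤ i → i ≤ n - 1 → p i = true → (d : Int) ≤ |i - mid|) →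
    pvOutward p n mid d fuel =
      (if (PySem.List.pyRange 1 n 1).filter p = [] then mid
       else
         match PySem.List.min? ((PySem.List.pyRange 1 n 1).filter p) (fun i => |i - mid|) with
         | some m => m
         | none => mid) := by
  induction fuel with
  | zero =>
    intro d h1 h2 hf hd
    have hempty : (PySem.List.pyRange 1 n 1).filter p = [] := by
      apply List.eq_nil_iff_forall_not_mem.mpr
      intro y hy
      simp only [List.mem_filter, PySem.List.mem_pyRange_one] at hy
      obtain ⟨⟨hy1, hy2⟩, hpy⟩ := hy
      have := hd y (by omega) (by omega) hpy
      rcases abs_cases (y - mid) with ⟨h5, h6⟩ | ⟨h5, h6⟩ <;> omega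
    rw [pvOutward, if_pos hempty]
  | succ fuel ih =>
    intro d h1 h2 hf hd
    rw [pvOutward]
    by_cases hg : 1 ≤ mid - (d : Int) ∨ mid + (d : Int) ≤ n - 1
    · rw [if_pos hg]
      by_cases hleft : 1 ≤ mid - (d : Int) ∧ p (mid - (d : Int)) = true
      · -- returns mid - d
        rw [if_pos hleft]
        obtain ⟨hge, hp⟩ := hleft
        set x : Int := mid - (d : Int) with hxdef
        have hx1 : 1 ≤ x := hge
        have hxn : x ≤ n - 1 := by omega
        have hsplit := pvFilter_split p n x hx1 hxn hp
        have hxk : |x - mid| = (d : Int) := by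
          have hx' : x - mid = -(d : Int) := by omega
          rw [hx', abs_neg]; exact abs_of_nonneg (by positivity)
        have hmin : PySem.List.min? ((PySem.List.pyRange 1 n 1).filter p) (fun i => |i - mid|) = some x := by
          rw [hsplit]
          apply pvMin?_first
          · intro y hy
            simp only [List.mem_filter, PySem.List.mem_pyRange_one] at hy
            obtain ⟨⟨hy1, hy2⟩, _⟩ := hy
            rcases abs_cases (y - mid) with ⟨h5, h6⟩ | ⟨h5, h6⟩ <;> omega
          · intro y hy
            simp only [List.mem_filter, PySem.List.mem_pyRange_one] at hy
            obtain ⟨⟨hy1, hy2⟩, hpy⟩ := hy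
            have := hd y (by omega) (by omega) hpy
            omega
        have hne : (PySem.List.pyRange 1 n 1).filter p ≠ [] := by
          rw [hsplit]; simp
        rw [if_neg hne, hmin]
      · rw [if_neg hleft]
        by_cases hright : mid + (d : Int) ≤ n - 1 ∧ p (mid + (d : Int)) = true
        · -- returns mid + d
          rw [if_pos hright]
          obtain ⟨hle, hp⟩ := hright
          set x : Int := mid + (d : Int) with hxdef
          have hx1 : 1 ≤ x := by omega
          have hxn : x ≤ n - 1 := hle
          have hnl : ¬ (1 ≤ mid - (d : Int)) ∨ p (mid - (d : Int)) = false := by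
            by_cases hc : 1 ≤ mid - (d : Int)
            · right
              rcases Bool.eq_false_or_eq_true (p (mid - (d : Int))) with h | h
              · exact absurd ⟨hc, h⟩ hleft
              · exact h
            · exact Or.inl hc
          have hsplit := pvFilter_split p n x hx1 hxn hp
          have hxk : |x - mid| = (d : Int) := by
            have hx' : x - mid = (d : Int) := by omega
            rw [hx']; exact abs_of_nonneg (by positivity)
          have hmin : PySem.List.min? ((PySem.List.pyRange 1 n 1).filter p) (fun i => |i - mid|) = some x := by
            rw [hsplit]
            apply pvMin?_first
            · intro y hy
              simp only [List.mem_filter, PySem.List.mem_pyRange_one] at hy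
              obtain ⟨⟨hy1, hy2⟩, hpy⟩ := hy
              have hdy := hd y (by omega) (by omega) hpy
              -- y < x and |y - mid| ≥ d; y = mid - d is excluded by the failed left test
              have hyne : y ≠ mid - (d : Int) := by
                intro he
                rcases hnl with hc | hc
                · omega
                · rw [he] at hpy; simp [hpy] at hc
              rcases abs_cases (y - mid) with ⟨h5, h6⟩ | ⟨h5, h6⟩ <;> omega
            · intro y hy
              simp only [List.mem_filter, PySem.List.mem_pyRange_one] at hy
              obtain ⟨⟨hy1, hy2⟩, hpy⟩ := hy
              have := hd y (by omega) (by omega) hpy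
              omega
          have hne : (PySem.List.pyRange 1 n 1).filter p ≠ [] := by
            rw [hsplit]; simp
          rw [if_neg hne, hmin]
        · -- neither mid-d nor mid+d is a candidate: recurse at d+1
          rw [if_neg hright]
          apply ih (d + 1) h1 h2 (by omega)
          intro i hi1 hi2 hpi
          have hdi := hd i hi1 hi2 hpi
          have hne_l : i ≠ mid - (d : Int) ∨ ¬ (1 ≤ mid - (d : Int)) := by
            by_cases hc : i = mid - (d : Int)
            · right; intro hge; exact hleft ⟨hge, by rwa [← hc]⟩
            · exact Or.inl hc
          have hne_r : i ≠ mid + (d : Int) ∨ ¬ (mid + (d : Int) ≤ n - 1) := by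
            by_cases hc : i = mid + (d : Int)
            · right; intro hle; exact hright ⟨hle, by rwa [← hc]⟩
            · exact Or.inl hc
          push_cast
          rcases abs_cases (i - mid) with ⟨h5, h6⟩ | ⟨h5, h6⟩ <;>
            rcases hne_l with hl | hl <;> rcases hne_r with hr | hr <;> omega
    · -- window exhausted: no candidates at all
      rw [if_neg hg]
      have hempty : (PySem.List.pyRange 1 n 1).filter p = [] := by
        apply List.eq_nil_iff_forall_not_mem.mpr
        intro y hy
        simp only [List.mem_filter, PySem.List.mem_pyRange_one] at hy
        obtain ⟨⟨hy1, hy2⟩, hpy⟩ := hy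
        have := hd y (by omega) (by omega) hpy
        rw [not_or] at hg
        rcases abs_cases (y - mid) with ⟨h5, h6⟩ | ⟨h5, h6⟩ <;> omega
      rw [if_pos hempty]

-- ===== VERDICT (by name: the statement is the Claim_ definition above) =====
theorem find_best_split_index_py_spec : Claim_equal_find_best_split_index_py := by
  intro lines _
  unfold Spec_find_best_split_index_py find_best_split_index_py find_best_split_index_py_alt
  by_cases hn : (lines.length : Int) ≤ 1
  · simp [hn]
  · simp only [hn, if_false]
    have hn2 : 2 ≤ (lines.length : Int) := by omega
    have hmid : PySem.Int.floordiv (lines.length : Int) 2 = (lines.length : Int) / 2 := by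
      unfold PySem.Int.floordiv
      rw [Int.fdiv_eq_ediv]
      simp
    set n : Int := (lines.length : Int)
    set p : Int → Bool := fun i => pvGoodBoundary (PySem.List.pyGetD lines (i - 1) "") with hp
    rw [PySem.List.foldl_append_if_eq_filter p (PySem.List.pyRange 1 n 1) []]
    rw [List.nil_append]
    rw [pvOutward_eq p n (PySem.Int.floordiv n 2) (lines.length + 1) 0
      (by rw [hmid]; omega) (by rw [hmid]; omega) (by omega)
      (by intro i _ _ _; positivity)]
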